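-- pv_equiv track=rewrite | github.com/BlackiePiggy/ML_FP | flexpower_causal_transformer/visualization_result.py | find_consecutive_regions
-- ===== SOURCE A (Python) =====
-- def find_consecutive_regions(binary_vector):
-- 	"""
-- 	Find start and end indices of consecutive 1s in a binary vector
-- 	(Direct translation of MATLAB helper function)
-- 	"""
-- 	regions = []
-- 	in_region = False
-- 	start_idx = 0
--
-- 	for i in range(len(binary_vector)):
-- 		if binary_vector[i] and not in_region:
-- 			in_region = True
-- 			start_idx = i
-- 		elif not binary_vector[i] and in_region:
-- 			in_region = False
-- 			regions.append([start_idx, i - 1])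
--
-- 	# Handle case where region extends to the end
-- 	if in_region:
-- 		regions.append([start_idx, len(binary_vector) - 1])
--
-- 	return regions
-- ===== SOURCE B (Python) =====
-- def find_consecutive_regions(binary_vector):
--     n = len(binary_vector)
--     starts = [i for i in range(n)
--               if binary_vector[i] and (i == 0 or not binary_vector[i - 1])]
--     ends = [i for i in range(n)
--             if binary_vector[i] and (i == n - 1 or not binary_vector[i + 1])]
--     return [[s, e] for s, e in zip(starts, ends)]
-- ===== Notes on version B (the rewrite author's own statement) =====
-- stated objective: alternative
-- what changed: Replaces the stateful single-pass in_region scan by stateless edge detection: an index is a region start when it is truthy with a falsy/absent left neighbour, an end when truthy with a falsy/absent right neighbour; the two edge lists are zipped positionally.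
import Mathlib
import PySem

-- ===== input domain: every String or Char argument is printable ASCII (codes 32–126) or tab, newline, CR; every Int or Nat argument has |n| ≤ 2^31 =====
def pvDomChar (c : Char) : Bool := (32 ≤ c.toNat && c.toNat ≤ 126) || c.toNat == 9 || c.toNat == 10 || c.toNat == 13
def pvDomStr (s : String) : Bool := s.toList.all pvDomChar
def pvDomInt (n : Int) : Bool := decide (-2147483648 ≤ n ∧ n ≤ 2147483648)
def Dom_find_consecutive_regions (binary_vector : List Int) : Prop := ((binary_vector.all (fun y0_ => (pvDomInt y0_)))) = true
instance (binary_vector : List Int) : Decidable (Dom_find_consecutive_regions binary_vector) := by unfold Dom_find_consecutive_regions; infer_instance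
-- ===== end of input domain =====

-- B replaces A's stateful in_region scan by stateless edge detection (alternative decomposition, same cost).

-- ===== PORT A =====
-- the for-loop over range(len(binary_vector)) as the obvious structural recursion over the
-- list carrying the index i and the loop state (regions, in_region, start_idx)
def find_consecutive_regions_go (i : Int) (in_region : Bool) (start_idx : Int)
    (regions : List (List Int)) : List Int → (List (List Int)) × Bool × Int
  | [] => (regions, in_region, start_idx)
  | x :: rest =>
      if (x != 0) && !in_region then
        find_consecutive_regions_go (i + 1) true i regions rest
      else if !(x != 0) && in_region then
        find_consecutive_regions_go (i + 1) false start_idx (regions ++ [[start_idx, i - 1]]) rest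
      else
        find_consecutive_regions_go (i + 1) in_region start_idx regions rest

def find_consecutive_regions (binary_vector : List Int) : List (List Int) :=
  match find_consecutive_regions_go 0 false 0 [] binary_vector with
  | (regions, in_region, start_idx) =>
      if in_region then regions ++ [[start_idx, (binary_vector.length : Int) - 1]] else regions

-- ===== PORT B =====
def find_consecutive_regions_alt (binary_vector : List Int) : List (List Int) :=
  let n := binary_vector.length
  let truthy := fun (i : Nat) => binary_vector.getD i 0 != 0
  let starts := (List.range n).filter (fun i => truthy i && (i == 0 || !truthy (i - 1)))
  let ends := (List.range n).filter (fun i => truthy i && (i == n - 1 || !truthy (i + 1)))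
  (starts.zip ends).map (fun p => [(p.1 : Int), (p.2 : Int)])

-- ===== PRECONDITION & SPEC =====
def Spec_find_consecutive_regions (binary_vector : List Int) (out : List (List Int)) : Prop := out = find_consecutive_regions_alt binary_vector
instance (binary_vector : List Int) (out : List (List Int)) : Decidable (Spec_find_consecutive_regions binary_vector out) := by unfold Spec_find_consecutive_regions; infer_instance

-- ===== CLAIM (what is proved, stated in full; the proofs are below) =====
def Claim_equal_find_consecutive_regions : Prop := ∀ (binary_vector : List Int), Dom_find_consecutive_regions binary_vector → Spec_find_consecutive_regions binary_vector (find_consecutive_regions binary_vector)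

-- ===== LEMMAS AND PROOFS =====

-- specification helpers: edge lists over the truthiness list, with index offset i and
-- prev = truthiness of element i-1 (false at i = 0)
def pvStarts (i : Int) (prev : Bool) : List Bool → List Int
  | [] => []
  | b :: rest => if b && !prev then i :: pvStarts (i + 1) b rest else pvStarts (i + 1) b rest

-- prev-timed ends: the end i-1 is emitted when the falsy element at i (or the end of the list) is seen
def pvEnds (i : Int) (prev : Bool) : List Bool → List Int
  | [] => if prev then [i - 1] else []
  | b :: rest => if prev && !b then (i - 1) :: pvEnds (i + 1) b rest else pvEnds (i + 1) b rest

-- lookahead-timed ends (B's timing)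
def pvEndsL (i : Int) : List Bool → List Int
  | [] => []
  | [b] => if b then [i] else []
  | b :: c :: rest => if b && !c then i :: pvEndsL (i + 1) (c :: rest) else pvEndsL (i + 1) (c :: rest)

def pvZipPair (s e : List Int) : List (List Int) := (s.zip e).map (fun p => [p.1, p.2])

-- A's loop result, with the final close at index n
def pvRegions (i : Int) (inr : Option Int) : List Bool → List (List Int)
  | [] => match inr with | some s => [[s, i - 1]] | none => []
  | b :: rest =>
      match inr with
      | none => if b then pvRegions (i + 1) (some i) rest else pvRegions (i + 1) none rest
      | some s => if b then pvRegions (i + 1) (some s) rest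
                  else [s, i - 1] :: pvRegions (i + 1) none rest

def pvTr (binary_vector : List Int) : List Bool := binary_vector.map (fun x => x != 0)

theorem pv_goA (bs : List Int) : ∀ (i s : Int) (inr : Bool) (acc : List (List Int)),
    (match find_consecutive_regions_go i inr s acc bs with
     | (r, f, st) => if f then r ++ [[st, i + bs.length - 1]] else r)
    = acc ++ pvRegions i (if inr then some s else none) (pvTr bs) := by
  induction bs with
  | nil =>
      intro i s inr acc
      cases inr <;> simp [find_consecutive_regions_go, pvRegions, pvTr]
  | cons x rest ih =>
      intro i s inr acc
      have hn : i + ((rest.length : Int) + 1) - 1 = (i + 1) + (rest.length : Int) - 1 := by ring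
      by_cases hx : x = 0 <;> cases inr <;>
        simp [find_consecutive_regions_go, pvRegions, pvTr, hx, hn, ih, List.append_assoc]

theorem pv_main (bs : List Bool) : ∀ (i : Int) (inr : Option Int),
    pvRegions i inr bs = pvZipPair (inr.toList ++ pvStarts i inr.isSome bs) (pvEnds i inr.isSome bs) := by
  induction bs with
  | nil =>
      intro i inr
      cases inr <;> simp [pvRegions, pvStarts, pvEnds, pvZipPair]
  | cons b rest ih =>
      intro i inr
      cases inr <;> cases b <;>
        simp [pvRegions, pvStarts, pvEnds, ih, pvZipPair]

theorem pv_endsL_cons (bs : List Bool) : ∀ (i : Int) (b : Bool),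
    pvEndsL i (b :: bs) = pvEnds (i + 1) b bs := by
  induction bs with
  | nil => intro i b; cases b <;> simp [pvEndsL, pvEnds]
  | cons c rest ih => intro i b; cases b <;> cases c <;> simp [pvEndsL, pvEnds, ih]

theorem pv_ends0 (bs : List Bool) : pvEnds 0 false bs = pvEndsL 0 bs := by
  cases bs with
  | nil => simp [pvEnds, pvEndsL]
  | cons b rest => simp [pvEnds, pv_endsL_cons]

theorem pv_startsF (suf : List Int) : ∀ (bv : List Int) (j : Nat) (prev : Bool),
    j + suf.length = bv.length →
    (∀ m, m < suf.length → bv.getD (j + m) 0 = suf.getD m 0) →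
    prev = (decide (0 < j) && (bv.getD (j - 1) 0 != 0)) →
    ((List.range' j suf.length).filter
        (fun i => (bv.getD i 0 != 0) && (i == 0 || !(bv.getD (i - 1) 0 != 0)))).map
      (Int.ofNat) = pvStarts (j : Int) prev (pvTr suf) := by
  induction suf with
  | nil => intro bv j prev h1 h2 hprev; simp [pvStarts, pvTr]
  | cons x rest ih =>
      intro bv j prev h1 h2 hprev
      have hx : bv[j]?.getD 0 = x := by simpa [List.getD] using h2 0 (by simp)
      have hrec := ih bv (j + 1) (x != 0)
        (by simp at h1 ⊢; omega)
        (by intro m hm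
            have := h2 (m + 1) (by simp; omega)
            simpa [Nat.add_assoc, Nat.add_comm 1 m] using this)
        (by simp [List.getD, hx])
      simp only [pvTr, List.map_cons, List.getD] at hrec ⊢
      simp only [List.length_cons]
      rw [List.range'_succ, List.filter_cons]
      push_cast at hrec
      by_cases hj : j = 0
      · subst hj
        have hp0 : prev = false := by simpa using hprev
        subst hp0
        by_cases hxx : x = 0
        · simpa [hx, hxx, pvStarts] using hrec
        · simpa [hx, hxx, pvStarts] using hrec
      · subst hprev
        have hjj : (j == 0) = false := by simp [hj]
        have hdj : decide (0 < j) = true := by simp [Nat.pos_of_ne_zero hj]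
        by_cases hxx : x = 0 <;> by_cases hb : bv[j - 1]?.getD 0 = 0
        · simpa [hx, hxx, hjj, hdj, hb, pvStarts] using hrec
        · simpa [hx, hxx, hjj, hdj, hb, pvStarts] using hrec
        · simpa [hx, hxx, hjj, hdj, hb, pvStarts] using hrec
        · simpa [hx, hxx, hjj, hdj, hb, pvStarts] using hrec

theorem pv_endsF (suf : List Int) : ∀ (bv : List Int) (j : Nat),
    j + suf.length = bv.length →
    (∀ m, m < suf.length → bv.getD (j + m) 0 = suf.getD m 0) →
    ((List.range' j suf.length).filter
        (fun i => (bv.getD i 0 != 0) && (i == bv.length - 1 || !(bv.getD (i + 1) 0 != 0)))).map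
      (Int.ofNat) = pvEndsL (j : Int) (pvTr suf) := by
  induction suf with
  | nil => intro bv j h1 h2; simp [pvEndsL, pvTr]
  | cons x rest ih =>
      intro bv j h1 h2
      have hx : bv[j]?.getD 0 = x := by simpa [List.getD] using h2 0 (by simp)
      have hrec := ih bv (j + 1)
        (by simp at h1 ⊢; omega)
        (by intro m hm
            have := h2 (m + 1) (by simp; omega)
            simpa [Nat.add_assoc, Nat.add_comm 1 m] using this)
      simp only [pvTr, List.map_cons, List.getD] at hrec ⊢
      simp only [List.length_cons]
      rw [List.range'_succ, List.filter_cons]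
      cases rest with
      | nil =>
          have hlast : (j == bv.length - 1) = true := by
            simp at h1; simp; omega
          by_cases hxx : x = 0
          · simpa [hx, hxx, hlast, pvEndsL] using hrec
          · simpa [hx, hxx, hlast, pvEndsL] using hrec
      | cons c rest' =>
          have hc : bv[j + 1]?.getD 0 = c := by simpa [List.getD] using h2 1 (by simp)
          have hlast : (j == bv.length - 1) = false := by
            simp at h1 ⊢; omega
          by_cases hxx : x = 0 <;> by_cases hcc : c = 0
          · simpa [hx, hc, hxx, hcc, hlast, pvEndsL] using hrec
          · simpa [hx, hc, hxx, hcc, hlast, pvEndsL] using hrec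
          · simpa [hx, hc, hxx, hcc, hlast, pvEndsL] using hrec
          · simpa [hx, hc, hxx, hcc, hlast, pvEndsL] using hrec

theorem pv_zipcast (a b : List Nat) :
    pvZipPair (a.map (Int.ofNat)) (b.map (Int.ofNat)) =
      (a.zip b).map (fun p => [(p.1 : Int), (p.2 : Int)]) := by
  simp [pvZipPair, List.zip_map, List.map_map, Function.comp]

-- ===== VERDICT (by name: the statement is the Claim_ definition above) =====
theorem find_consecutive_regions_spec : Claim_equal_find_consecutive_regions := by
  intro bv _
  unfold Spec_find_consecutive_regions
  have hA : find_consecutive_regions bv = pvRegions 0 none (pvTr bv) := by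
    have := pv_goA bv 0 0 false []
    simpa [find_consecutive_regions] using this
  have hS := pv_startsF bv bv 0 false (by simp) (by intro m hm; simp) (by simp)
  have hE := pv_endsF bv bv 0 (by simp) (by intro m hm; simp)
  simp only [Nat.cast_zero] at hS hE
  rw [hA, pv_main, find_consecutive_regions_alt]
  simp only [Option.toList, Option.isSome, List.nil_append]
  rw [pv_ends0, List.range_eq_range', ← pv_zipcast, hS, hE]
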